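-- pv_equiv track=rewrite | github.com/sbogdan/codejam | 2018/qualification/Universe/Universe-dumb.py | computeDamage
-- ===== SOURCE A (Python) =====
-- def computeDamage(prog):
--     total, crt = 0, 1
--     for instr in prog:
--         if instr == 'C':
--             crt *= 2
--         else:
--             total += crt
--
--     return total
-- ===== SOURCE B (Python) =====
-- def computeDamage(prog):
--     acc = 0
--     for instr in reversed(prog):
--         if instr == 'C':
--             acc *= 2
--         else:
--             acc += 1
--     return acc
-- ===== Notes on version B (the rewrite author's own statement) =====
-- stated objective: alternative
-- what changed: Replaces the left-to-right two-accumulator scan (total, current multiplier) with a right-to-left single-accumulator fold where each 'C' doubles the accumulated count of S's to its right.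
import Mathlib
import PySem

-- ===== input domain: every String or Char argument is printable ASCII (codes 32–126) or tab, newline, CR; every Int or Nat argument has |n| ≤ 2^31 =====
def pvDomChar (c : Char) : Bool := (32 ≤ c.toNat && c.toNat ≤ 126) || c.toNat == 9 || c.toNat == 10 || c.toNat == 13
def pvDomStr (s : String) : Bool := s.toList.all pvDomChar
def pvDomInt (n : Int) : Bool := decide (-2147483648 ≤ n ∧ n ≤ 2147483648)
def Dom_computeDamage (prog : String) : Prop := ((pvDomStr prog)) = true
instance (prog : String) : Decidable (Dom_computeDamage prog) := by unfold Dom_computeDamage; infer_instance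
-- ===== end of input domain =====

-- B rewrites A's left-to-right (total, multiplier) scan as a right-to-left single-accumulator fold (alternative decomposition, same cost).


-- ===== PORT A =====
-- for instr in prog: if 'C' then crt *= 2 else total += crt; return total
def computeDamage (prog : String) : Int :=
  (prog.toList.foldl
    (fun (st : Int × Int) instr =>
      if instr = 'C' then (st.1, st.2 * 2) else (st.1 + st.2, st.2))
    (0, 1)).1

-- ===== PORT B =====
-- for instr in reversed(prog): if 'C' then acc *= 2 else acc += 1; return acc
def computeDamage_alt (prog : String) : Int :=
  prog.toList.reverse.foldl
    (fun (acc : Int) instr => if instr = 'C' then acc * 2 else acc + 1)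
    0

-- ===== PRECONDITION & SPEC =====
def Spec_computeDamage (prog : String) (out : Int) : Prop := out = computeDamage_alt prog
instance (prog : String) (out : Int) : Decidable (Spec_computeDamage prog out) := by unfold Spec_computeDamage; infer_instance

-- ===== CLAIM (what is proved, stated in full; the proofs are below) =====
def Claim_equal_computeDamage : Prop := ∀ (prog : String), Dom_computeDamage prog → Spec_computeDamage prog (computeDamage prog)

-- ===== LEMMAS AND PROOFS =====

def pvB (l : List Char) : Int :=
  l.reverse.foldl (fun (acc : Int) instr => if instr = 'C' then acc * 2 else acc + 1) 0

theorem pvB_cons (c : Char) (l : List Char) :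
    pvB (c :: l) = if c = 'C' then pvB l * 2 else pvB l + 1 := by
  simp [pvB, List.foldl_append]

theorem pvAB (l : List Char) : ∀ t c : Int,
    (l.foldl
      (fun (st : Int × Int) instr =>
        if instr = 'C' then (st.1, st.2 * 2) else (st.1 + st.2, st.2))
      (t, c)).1 = t + c * pvB l := by
  induction l with
  | nil => intro t c; simp [pvB]
  | cons ch l ih =>
    intro t c
    rw [pvB_cons]
    by_cases h : ch = 'C' <;> simp [List.foldl_cons, h, ih] <;> ring

-- ===== VERDICT (by name: the statement is the Claim_ definition above) =====
theorem computeDamage_spec : Claim_equal_computeDamage := by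
  intro prog _
  show computeDamage prog = computeDamage_alt prog
  have := pvAB prog.toList 0 1
  simpa [computeDamage, computeDamage_alt, pvB] using this
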